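-- pv_equiv track=rewrite | github.com/jujaemin/Problem-Solving | 프로그래머스/2/340212. ［PCCP 기출문제］ 2번 ／ 퍼즐 게임 챌린지/［PCCP 기출문제］ 2번 ／ 퍼즐 게임 챌린지.py | solution
-- ===== SOURCE A (Python) =====
-- def solution(diffs, times, limit):
--
--     def binary_search(start, end):
--
--         mid = (start + end) // 2
--         total = times[0]
--
--         if start == end:
--             return mid
--
--         for i in range(1, len(times)):
--             if diffs[i] > mid:
--                 total += ((times[i]+times[i-1])*(diffs[i]-mid))+times[i]
--
--             else:
--                 total += times[i]
--
--         if total > limit: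
--             start = mid+1
--
--         else:
--             end = mid
--
--         return binary_search(start, end)
--
--     start, end = min(diffs), max(diffs)
--     answer = binary_search(start, end)
--
--     return answer
-- ===== SOURCE B (Python) =====
-- def solution(diffs, times, limit):
--     # Precompute once: base = total of all times, pen = (difficulty, penalty-weight) pairs.
--     base = sum(times)
--     pen = list(zip(diffs[1:], [a + b for a, b in zip(times[1:], times)]))
--
--     def total(mid):
--         return base + sum(w * (d - mid) for d, w in pen if d > mid)
--
--     # lower_bound-style search on (lo, width) instead of (start, end).
--     lo, n = min(diffs), max(diffs) - min(diffs)
--     while n > 0: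
--         half = n // 2
--         if total(lo + half) > limit:
--             lo += half + 1
--             n -= half + 1
--         else:
--             n = half
--     return lo
-- ===== Notes on version B (the rewrite author's own statement) =====
-- stated objective: faster
-- what changed: B precomputes the base sum of times and the (difficulty, weight) penalty pairs once so each search step only folds over that pair list (no per-step indexing or time re-summation), and replaces the recursive binary search on (start, end) with a lower_bound-style iterative loop on (lo, width).
import Mathlib
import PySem

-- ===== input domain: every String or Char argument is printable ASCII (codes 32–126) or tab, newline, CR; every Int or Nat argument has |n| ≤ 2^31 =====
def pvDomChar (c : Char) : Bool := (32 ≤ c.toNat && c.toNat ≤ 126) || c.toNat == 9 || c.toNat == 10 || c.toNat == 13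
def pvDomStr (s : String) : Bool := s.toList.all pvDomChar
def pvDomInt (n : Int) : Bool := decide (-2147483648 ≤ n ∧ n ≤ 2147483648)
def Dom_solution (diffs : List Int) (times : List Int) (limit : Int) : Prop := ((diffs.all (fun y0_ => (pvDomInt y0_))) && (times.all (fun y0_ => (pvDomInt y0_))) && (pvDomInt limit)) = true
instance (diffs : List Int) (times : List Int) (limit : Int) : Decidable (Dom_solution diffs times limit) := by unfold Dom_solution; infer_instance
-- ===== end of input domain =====

-- B precomputes the penalty pairs and the base sum once and runs a lower_bound-style
-- iterative search on (lo, width) instead of A's recursion on (start, end); the timing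
-- run measured B faster by a constant factor (less work per search step).

-- ===== PORT A =====
-- A's inner 'for i in range(1, len(times))' accumulation (total starts at times[0]).
def pvTotalA (diffs times : List Int) (mid : Int) : Int :=
  (PySem.List.pyRange 1 (times.length : Int) 1).foldl
    (fun total i =>
      if PySem.List.pyGetD diffs i 0 > mid then
        total + ((PySem.List.pyGetD times i 0 + PySem.List.pyGetD times (i - 1) 0) *
                   (PySem.List.pyGetD diffs i 0 - mid) + PySem.List.pyGetD times i 0)
      else
        total + PySem.List.pyGetD times i 0)
    (PySem.List.pyGetD times 0 0)

-- A's recursive binary_search; fuel only makes the recursion total (with the fuel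
-- supplied below the 0-case is never reached on inputs satisfying Pre_solution).
def pvGoA (diffs times : List Int) (limit : Int) : Nat → Int → Int → Int
  | 0, start, _ => start
  | fuel + 1, start, en =>
      let mid := PySem.Int.floordiv (start + en) 2
      if start = en then mid
      else if pvTotalA diffs times mid > limit then pvGoA diffs times limit fuel (mid + 1) en
      else pvGoA diffs times limit fuel start mid

def solution (diffs : List Int) (times : List Int) (limit : Int) : Int :=
  let start := (PySem.List.min? diffs (fun x => x)).getD 0
  let en := (PySem.List.max? diffs (fun x => x)).getD 0
  pvGoA diffs times limit ((en - start).toNat + 1) start en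

-- ===== PORT B =====
-- B's precomputed pair list: zip(diffs[1:], [a+b for a,b in zip(times[1:], times)]).
def pvPen (diffs times : List Int) : List (Int × Int) :=
  (PySem.List.slice diffs (some 1) none).zip
    (((PySem.List.slice times (some 1) none).zip times).map (fun p => p.1 + p.2))

-- B's total(mid): base + sum(w*(d-mid) for d, w in pen if d > mid).
def pvTotalB (base : Int) (pen : List (Int × Int)) (mid : Int) : Int :=
  base + pen.foldl (fun acc p => if p.1 > mid then acc + p.2 * (p.1 - mid) else acc) 0

-- B's 'while n > 0' lower_bound loop on (lo, n); fuel only makes the loop total.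
def pvGoB (limit base : Int) (pen : List (Int × Int)) : Nat → Int → Int → Int
  | 0, lo, _ => lo
  | fuel + 1, lo, n =>
      if n > 0 then
        let half := PySem.Int.floordiv n 2
        if pvTotalB base pen (lo + half) > limit then
          pvGoB limit base pen fuel (lo + half + 1) (n - half - 1)
        else pvGoB limit base pen fuel lo half
      else lo

def solution_alt (diffs : List Int) (times : List Int) (limit : Int) : Int :=
  let base := times.sum
  let pen := pvPen diffs times
  let lo := (PySem.List.min? diffs (fun x => x)).getD 0
  let hi := (PySem.List.max? diffs (fun x => x)).getD 0
  pvGoB limit base pen (hi - lo).toNat lo (hi - lo)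

-- ===== PRECONDITION & SPEC =====
-- Pre_ excludes exactly the inputs where A raises: empty diffs or times (IndexError /
-- ValueError on min), and times longer than diffs unless min(diffs)=max(diffs)
-- (IndexError on diffs[i] in the comparison loop).
def Pre_solution (diffs : List Int) (times : List Int) (limit : Int) : Prop :=
  diffs ≠ [] ∧ times ≠ [] ∧
    (times.length ≤ diffs.length ∨
      PySem.List.min? diffs (fun x => x) = PySem.List.max? diffs (fun x => x))
instance (diffs : List Int) (times : List Int) (limit : Int) : Decidable (Pre_solution diffs times limit) := by unfold Pre_solution; infer_instance

def pvWitness_solution : List Int × List Int × Int := ([1, 5, 3], [2, 1, 4], 30)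

def Spec_solution (diffs : List Int) (times : List Int) (limit : Int) (out : Int) : Prop := out = solution_alt diffs times limit
instance (diffs : List Int) (times : List Int) (limit : Int) (out : Int) : Decidable (Spec_solution diffs times limit out) := by unfold Spec_solution; infer_instance

-- ===== CLAIM (what is proved, stated in full; the proofs are below) =====
def Claim_equal_solution : Prop := ∀ (diffs : List Int) (times : List Int) (limit : Int), Dom_solution diffs times limit → Pre_solution diffs times limit → Spec_solution diffs times limit (solution diffs times limit)

-- ===== LEMMAS AND PROOFS =====

lemma pvTotal_eq (diffs times : List Int) (mid : Int)
    (hne : times ≠ []) (h : times.length ≤ diffs.length) :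
    pvTotalA diffs times mid = pvTotalB times.sum (pvPen diffs times) mid := by
  unfold pvTotalA pvTotalB pvPen
  rw [PySem.List.slice_from_one, PySem.List.slice_from_one]
  have hA : (fun (total : Int) (i : Int) =>
      if PySem.List.pyGetD diffs i 0 > mid then
        total + ((PySem.List.pyGetD times i 0 + PySem.List.pyGetD times (i - 1) 0) *
                   (PySem.List.pyGetD diffs i 0 - mid) + PySem.List.pyGetD times i 0)
      else total + PySem.List.pyGetD times i 0)
      = (fun (total : Int) (i : Int) => total +
          (PySem.List.pyGetD times i 0 +
            (if PySem.List.pyGetD diffs i 0 > mid then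
              (PySem.List.pyGetD times i 0 + PySem.List.pyGetD times (i - 1) 0) *
                (PySem.List.pyGetD diffs i 0 - mid)
             else 0))) := by
    funext t i; split <;> ring
  have hB : (fun (acc : Int) (p : Int × Int) =>
      if p.1 > mid then acc + p.2 * (p.1 - mid) else acc)
      = (fun (acc : Int) (p : Int × Int) => acc +
          (if p.1 > mid then p.2 * (p.1 - mid) else 0)) := by
    funext t p; split <;> ring
  rw [hA, hB, PySem.List.foldl_add, PySem.List.foldl_add, PySem.List.sum_map_add_int]
  have hlen : (PySem.List.pyRange 1 (times.length : Int) 1).length = times.length - 1 := by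
    rw [PySem.List.length_pyRange_one]; omega
  -- (1) the times part
  have h1 : (PySem.List.pyRange 1 (times.length : Int) 1).map
      (fun i => PySem.List.pyGetD times i 0) = times.tail := by
    apply List.ext_getElem
    · simp [hlen, List.length_tail]
    · intro j hj1 hj2
      rw [List.length_map, hlen] at hj1
      simp only [List.getElem_map, List.getElem_tail]
      rw [PySem.List.getElem_pyRange_one]
      rw [show (1 + (j : Int)) = ((j + 1 : Nat) : Int) by push_cast; ring,
        PySem.List.pyGetD_natCast, List.getD_eq_getElem?_getD,
        List.getElem?_eq_getElem (by omega : j + 1 < times.length)]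
      rfl
  -- (2) the penalty part
  have h2 : (PySem.List.pyRange 1 (times.length : Int) 1).map
      (fun i =>
        if PySem.List.pyGetD diffs i 0 > mid then
          (PySem.List.pyGetD times i 0 + PySem.List.pyGetD times (i - 1) 0) *
            (PySem.List.pyGetD diffs i 0 - mid)
        else 0)
      = (diffs.tail.zip ((times.tail.zip times).map (fun p => p.1 + p.2))).map
          (fun p => if p.1 > mid then p.2 * (p.1 - mid) else 0) := by
    apply List.ext_getElem
    · simp [hlen, List.length_zip, List.length_tail]
      omega
    · intro j hj1 hj2
      rw [List.length_map, hlen] at hj1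
      have hjd : j + 1 < diffs.length := by omega
      have hjt : j + 1 < times.length := by omega
      simp only [List.getElem_map, List.getElem_zip, List.getElem_tail]
      rw [PySem.List.getElem_pyRange_one]
      have e1 : PySem.List.pyGetD diffs (1 + (j : Int)) 0 = diffs[j + 1] := by
        rw [show (1 + (j : Int)) = ((j + 1 : Nat) : Int) by push_cast; ring,
          PySem.List.pyGetD_natCast, List.getD_eq_getElem?_getD,
          List.getElem?_eq_getElem hjd]; rfl
      have e2 : PySem.List.pyGetD times (1 + (j : Int)) 0 = times[j + 1] := by
        rw [show (1 + (j : Int)) = ((j + 1 : Nat) : Int) by push_cast; ring,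
          PySem.List.pyGetD_natCast, List.getD_eq_getElem?_getD,
          List.getElem?_eq_getElem hjt]; rfl
      have e3 : PySem.List.pyGetD times (1 + (j : Int) - 1) 0 = times[j] := by
        rw [show (1 + (j : Int) - 1) = ((j : Nat) : Int) by ring,
          PySem.List.pyGetD_natCast, List.getD_eq_getElem?_getD,
          List.getElem?_eq_getElem (by omega : j < times.length)]; rfl
      rw [e1, e2, e3]
  rw [h1, h2]
  -- remaining: head + sum tail = sum
  obtain ⟨t0, ts, rfl⟩ : ∃ t0 ts, times = t0 :: ts := by
    cases times with
    | nil => exact absurd rfl hne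
    | cons a l => exact ⟨a, l, rfl⟩
  rw [PySem.List.pyGetD_ofNat']
  simp [List.sum_cons]
  ring

lemma pvGo_eq (diffs times : List Int) (limit base : Int) (pen : List (Int × Int))
    (ht : ∀ mid, pvTotalA diffs times mid = pvTotalB base pen mid) :
    ∀ (fuel : Nat) (s e : Int), s ≤ e → (e - s).toNat ≤ fuel →
      pvGoA diffs times limit (fuel + 1) s e = pvGoB limit base pen fuel s (e - s) := by
  intro fuel
  induction fuel with
  | zero =>
    intro s e hse hf
    have he : s = e := by omega
    subst he
    rw [pvGoA]
    rw [if_pos rfl]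
    show PySem.Int.floordiv (s + s) 2 = pvGoB limit base pen 0 s (s - s)
    rw [pvGoB, PySem.Int.floordiv_eq_ediv_of_pos (by omega : (0:Int) < 2)]
    omega
  | succ f ih =>
    intro s e hse hf
    by_cases h : s = e
    · subst h
      rw [pvGoA, pvGoB]
      simp only [sub_self, gt_iff_lt, lt_irrefl, if_true, if_false]
      rw [PySem.Int.floordiv_eq_ediv_of_pos (by omega : (0:Int) < 2)]
      omega
    · have hlt : s < e := lt_of_le_of_ne hse h
      have hmid : PySem.Int.floordiv (s + e) 2 = s + PySem.Int.floordiv (e - s) 2 := by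
        rw [PySem.Int.floordiv_eq_ediv_of_pos (by omega : (0:Int) < 2),
          PySem.Int.floordiv_eq_ediv_of_pos (by omega : (0:Int) < 2)]
        omega
      have hhalf1 : 0 ≤ PySem.Int.floordiv (e - s) 2 := by
        rw [PySem.Int.floordiv_eq_ediv_of_pos (by omega : (0:Int) < 2)]; omega
      have hhalf2 : PySem.Int.floordiv (e - s) 2 < e - s := by
        rw [PySem.Int.floordiv_eq_ediv_of_pos (by omega : (0:Int) < 2)]; omega
      rw [pvGoA, pvGoB]
      simp only [if_neg h, if_pos (by omega : e - s > 0), ht, hmid]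
      set half := PySem.Int.floordiv (e - s) 2 with hh
      split
      · rw [show e - s - half - 1 = e - (s + half + 1) by ring]
        exact ih (s + half + 1) e (by omega) (by omega)
      · have h2 := ih s (s + half) (by omega) (by omega)
        rwa [show s + half - s = half by ring] at h2

-- ===== VERDICT (by name: the statement is the Claim_ definition above) =====
theorem solution_spec : Claim_equal_solution := by
  intro diffs times limit _ hpre
  unfold Spec_solution solution solution_alt
  rcases hpre with ⟨hd, ht, hcase⟩
  obtain ⟨m, hm⟩ : ∃ m, PySem.List.min? diffs (fun x => x) = some m := by
    cases hmin : PySem.List.min? diffs (fun x => x) with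
    | none => exact absurd ((PySem.List.min?_eq_none_iff diffs (fun x => x)).mp hmin) hd
    | some m => exact ⟨m, rfl⟩
  obtain ⟨M, hM⟩ : ∃ M, PySem.List.max? diffs (fun x => x) = some M := by
    cases hmax : PySem.List.max? diffs (fun x => x) with
    | none => exact absurd ((PySem.List.max?_eq_none_iff diffs (fun x => x)).mp hmax) hd
    | some M => exact ⟨M, rfl⟩
  have hmM : m ≤ M := PySem.List.max?_isMax hM m (PySem.List.min?_mem hm)
  rw [hm, hM]
  show pvGoA diffs times limit ((M - m).toNat + 1) m M =
    pvGoB limit times.sum (pvPen diffs times) (M - m).toNat m (M - m)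
  rcases hcase with hlen | hmm
  · exact pvGo_eq diffs times limit times.sum (pvPen diffs times)
      (fun mid => pvTotal_eq diffs times mid ht hlen) (M - m).toNat m M hmM (by omega)
  · -- min = max: degenerate interval; neither total is ever evaluated
    rw [hm, hM] at hmm
    have : m = M := by injection hmm
    subst this
    simp only [sub_self, Int.toNat_zero]
    rw [pvGoA]
    show (if m = m then PySem.Int.floordiv (m + m) 2 else _) = pvGoB limit times.sum (pvPen diffs times) 0 m 0
    rw [if_pos rfl, pvGoB, PySem.Int.floordiv_eq_ediv_of_pos (by omega : (0:Int) < 2)]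
    omega
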